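-- pv_equiv track=rewrite | github.com/mai-anh-tuan-anh/My-project | doi cho cac chu so.py | find_max_smaller_number
-- ===== SOURCE A (Python) =====
-- def find_max_smaller_number(s):
--     n = len(s)
--     s = list(s)
--     i = n - 2
--     while i >= 0 and s[i] <= s[i + 1]:
--         i -= 1
--     if i == -1:
--         return "-1"
--     max_j = i + 1
--     for j in range(i + 1, n):
--         if s[j] < s[i] and s[j] > s[max_j]:
--             max_j = j
--     s[i], s[max_j] = s[max_j], s[i]
--     if s[0] == '0':
--         return "-1"
--     return "".join(s)
-- ===== SOURCE B (Python) =====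
-- def find_max_smaller_number(s):
--     n = len(s)
--     best = None
--     for i in range(n):
--         for j in range(i + 1, n):
--             t = list(s)
--             t[i], t[j] = t[j], t[i]
--             t = "".join(t)
--             if t < s and (best is None or t > best):
--                 best = t
--     if best is None or best[0] == '0':
--         return "-1"
--     return best
-- ===== Notes on version B (the rewrite author's own statement) =====
-- stated objective: simpler
-- what changed: Replaces A's pivot-scan + candidate-scan greedy with a plain brute force that tries every single swap (i,j), keeps the running maximum of the swapped strings strictly smaller than s, and applies the leading-'0' rule to that best candidate.
import Mathlib
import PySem

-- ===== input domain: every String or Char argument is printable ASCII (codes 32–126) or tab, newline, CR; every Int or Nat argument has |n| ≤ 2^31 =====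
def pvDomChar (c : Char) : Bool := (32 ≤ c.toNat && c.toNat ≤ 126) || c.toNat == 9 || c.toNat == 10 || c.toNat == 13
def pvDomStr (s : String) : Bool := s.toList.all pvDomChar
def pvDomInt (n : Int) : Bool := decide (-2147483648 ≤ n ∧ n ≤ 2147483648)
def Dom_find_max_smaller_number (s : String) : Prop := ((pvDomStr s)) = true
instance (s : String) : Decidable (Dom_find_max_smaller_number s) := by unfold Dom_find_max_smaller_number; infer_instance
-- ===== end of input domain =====

-- B replaces A's pivot-scan greedy by a brute force over all single swaps (running maximum of
-- the strictly smaller swapped strings, leading-'0' rule applied to the best); simpler, not faster.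


-- ===== PORT A =====
-- the 'while i >= 0 and s[i] <= s[i+1]: i -= 1' loop of A
def pvPivotLoop (l : List Char) (i : Int) : Int :=
  if h : 0 ≤ i ∧ PySem.List.pyGetD l i ' ' ≤ PySem.List.pyGetD l (i + 1) ' ' then
    pvPivotLoop l (i - 1)
  else i
termination_by (i + 1).toNat
decreasing_by obtain ⟨h1, -⟩ := h; omega

def find_max_smaller_number (s : String) : String :=
  let l := s.toList
  let n : Int := l.length
  let i := pvPivotLoop l (n - 2)
  if i = -1 then "-1"
  else
    let max_j := (PySem.List.pyRange (i + 1) n 1).foldl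
      (fun max_j j =>
        if PySem.List.pyGetD l j ' ' < PySem.List.pyGetD l i ' ' ∧
           PySem.List.pyGetD l max_j ' ' < PySem.List.pyGetD l j ' ' then j else max_j)
      (i + 1)
    let l' := PySem.List.pySetD (PySem.List.pySetD l i (PySem.List.pyGetD l max_j ' '))
      max_j (PySem.List.pyGetD l i ' ')
    if PySem.List.pyGetD l' 0 ' ' = '0' then "-1" else String.ofList l'

-- ===== PORT B =====
def find_max_smaller_number_alt (s : String) : String :=
  let l := s.toList
  let n : Int := l.length
  let best := (PySem.List.pyRange 0 n 1).foldl
    (fun best i =>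
      (PySem.List.pyRange (i + 1) n 1).foldl
        (fun best j =>
          let t := PySem.List.pySetD (PySem.List.pySetD l i (PySem.List.pyGetD l j ' '))
            j (PySem.List.pyGetD l i ' ')
          if decide (t < l) && best.all (fun bb => decide (bb < t)) then some t else best)
        best)
    none
  match best with
  | none => "-1"
  | some b => if PySem.List.pyGetD b 0 ' ' = '0' then "-1" else String.ofList b

-- ===== PRECONDITION & SPEC =====
-- Pre_ excludes only the empty string, on which A raises IndexError (s[-1] on the empty list).
def Pre_find_max_smaller_number (s : String) : Prop := s ≠ ""
instance (s : String) : Decidable (Pre_find_max_smaller_number s) := by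
  unfold Pre_find_max_smaller_number; infer_instance
def pvWitness_find_max_smaller_number : String := "21"

def Spec_find_max_smaller_number (s : String) (out : String) : Prop :=
  out = find_max_smaller_number_alt s
instance (s : String) (out : String) : Decidable (Spec_find_max_smaller_number s out) := by
  unfold Spec_find_max_smaller_number; infer_instance

-- ===== CLAIM (what is proved, stated in full; the proofs are below) =====
def Claim_equal_find_max_smaller_number : Prop := ∀ (s : String),
  Dom_find_max_smaller_number s → Pre_find_max_smaller_number s →
  Spec_find_max_smaller_number s (find_max_smaller_number s)

-- ===== LEMMAS AND PROOFS =====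

-- swap of two positions, as both ports build it
def pvSwap (l : List Char) (i j : Nat) : List Char :=
  (l.set i (l.getD j ' ')).set j (l.getD i ' ')

-- the list of all swapped strings B tries, in B's order
def pvCandList (l : List Char) : List (List Char) :=
  (PySem.List.pyRange 0 (l.length : Int) 1).flatMap (fun i =>
    (PySem.List.pyRange (i + 1) (l.length : Int) 1).map (fun j =>
      PySem.List.pySetD (PySem.List.pySetD l i (PySem.List.pyGetD l j ' '))
        j (PySem.List.pyGetD l i ' ')))

-- B's running-max step
def pvStep (l : List Char) (best : Option (List Char)) (t : List Char) : Option (List Char) :=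
  if decide (t < l) && best.all (fun bb => decide (bb < t)) then some t else best

lemma getD_set_self (l : List Char) (i : Nat) (v : Char) (h : i < l.length) :
    (l.set i v).getD i ' ' = v := by
  simp [List.getD_eq_getElem?_getD, List.getElem?_set_self h]

lemma getD_set_ne (l : List Char) (i k : Nat) (v : Char) (h : i ≠ k) :
    (l.set i v).getD k ' ' = l.getD k ' ' := by
  simp [List.getD_eq_getElem?_getD, List.getElem?_set_ne h]

lemma length_pvSwap (l : List Char) (i j : Nat) : (pvSwap l i j).length = l.length := by
  simp [pvSwap]

lemma getD_pvSwap_j (l : List Char) (i j : Nat) (hij : i < j) (hj : j < l.length) :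
    (pvSwap l i j).getD j ' ' = l.getD i ' ' := by
  unfold pvSwap; exact getD_set_self _ _ _ (by simpa using hj)

lemma getD_pvSwap_i (l : List Char) (i j : Nat) (hij : i < j) (hj : j < l.length) :
    (pvSwap l i j).getD i ' ' = l.getD j ' ' := by
  unfold pvSwap
  rw [getD_set_ne _ _ _ _ (by omega : j ≠ i), getD_set_self _ _ _ (by omega)]

lemma getD_pvSwap_other (l : List Char) (i j k : Nat) (hki : k ≠ i) (hkj : k ≠ j) :
    (pvSwap l i j).getD k ' ' = l.getD k ' ' := by
  unfold pvSwap
  rw [getD_set_ne _ _ _ _ (Ne.symm hkj), getD_set_ne _ _ _ _ (Ne.symm hki)]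

lemma pvSwap_eq_self (l : List Char) (i j : Nat) (hi : i < l.length) (hj : j < l.length)
    (h : l.getD i ' ' = l.getD j ' ') : pvSwap l i j = l := by
  apply List.ext_getElem?
  intro k
  rcases eq_or_ne k j with rfl | hkj
  · rw [show pvSwap l i k = (l.set i (l.getD k ' ')).set k (l.getD i ' ') from rfl,
      List.getElem?_set_self (by simpa using hj), h, List.getD_eq_getElem?_getD]
    cases hx : l[k]? with
    | none => exact absurd (List.getElem?_eq_some_iff.mpr ⟨hj, rfl⟩) (by simp [hx])
    | some a => simp
  · rcases eq_or_ne k i with rfl | hki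
    · rw [show pvSwap l k j = (l.set k (l.getD j ' ')).set j (l.getD k ' ') from rfl,
        List.getElem?_set_ne (Ne.symm hkj), List.getElem?_set_self hi, ← h,
        List.getD_eq_getElem?_getD]
      cases hx : l[k]? with
      | none => exact absurd (List.getElem?_eq_some_iff.mpr ⟨hi, rfl⟩) (by simp [hx])
      | some a => simp
    · rw [show pvSwap l i j = (l.set i (l.getD j ' ')).set j (l.getD i ' ') from rfl,
        List.getElem?_set_ne (Ne.symm hkj), List.getElem?_set_ne (Ne.symm hki)]

-- strict lexicographic comparison from a first strictly smaller position
lemma lex_of_getD : ∀ (k : Nat) (x y : List Char), k < x.length → k < y.length →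
    (∀ m, m < k → x.getD m ' ' = y.getD m ' ') → x.getD k ' ' < y.getD k ' ' → x < y := by
  intro k
  induction k with
  | zero =>
    intro x y hx hy _ hlt
    cases x with
    | nil => simp at hx
    | cons a xs =>
      cases y with
      | nil => simp at hy
      | cons b ys => exact List.Lex.rel (by simpa using hlt)
  | succ k ih =>
    intro x y hx hy hpre hlt
    cases x with
    | nil => simp at hx
    | cons a xs =>
      cases y with
      | nil => simp at hy
      | cons b ys =>
        have h0 : a = b := by simpa using hpre 0 (Nat.succ_pos _)
        subst h0
        exact List.Lex.cons (ih xs ys (by simpa using hx) (by simpa using hy)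
          (fun m hm => by simpa using hpre (m + 1) (by omega)) (by simpa using hlt))

lemma getD_mono (l : List Char) (a : Nat)
    (h : ∀ k : Nat, a ≤ k → k + 1 < l.length → l.getD k ' ' ≤ l.getD (k + 1) ' ') :
    ∀ b c : Nat, a ≤ b → b ≤ c → c < l.length → l.getD b ' ' ≤ l.getD c ' ' := by
  intro b c hab hbc hc
  obtain ⟨d, rfl⟩ : ∃ d, c = b + d := ⟨c - b, by omega⟩
  clear hbc
  induction d with
  | zero => simp
  | succ d ih =>
    have step : l.getD (b + d) ' ' ≤ l.getD (b + d + 1) ' ' := h (b + d) (by omega) (by omega)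
    have : b + (d + 1) = (b + d) + 1 := by omega
    rw [this]
    exact le_trans (ih (by omega)) step

-- if the swap (i,j) is strictly smaller then s[j] < s[i]
lemma cand_char (l : List Char) (i j : Nat) (hij : i < j) (hj : j < l.length)
    (hc : pvSwap l i j < l) : l.getD j ' ' < l.getD i ' ' := by
  rcases lt_trichotomy (l.getD j ' ') (l.getD i ' ') with h | h | h
  · exact h
  · exfalso
    have heq : pvSwap l i j = l := pvSwap_eq_self l i j (by omega) hj h.symm
    rw [heq] at hc
    exact lt_irrefl l hc
  · exfalso
    have : l < pvSwap l i j := by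
      apply lex_of_getD i _ _ (by omega) (by rw [length_pvSwap]; omega)
      · intro m hm
        rw [getD_pvSwap_other l i j m (by omega) (by omega)]
      · rw [getD_pvSwap_i l i j hij hj]; exact h
    exact absurd hc (asymm this)

lemma swap_lt (l : List Char) (p q : Nat) (hpq : p < q) (hq : q < l.length)
    (hlt : l.getD q ' ' < l.getD p ' ') : pvSwap l p q < l := by
  apply lex_of_getD p _ _ (by rw [length_pvSwap]; omega) (by omega)
  · intro m hm
    rw [getD_pvSwap_other l p q m (by omega) (by omega)]
  · rw [getD_pvSwap_i l p q hpq hq]; exact hlt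

-- every strictly smaller single swap is ≤ the swap A performs
lemma cand_le (l : List Char) (p q : Nat) (hpq : p < q) (hqn : q < l.length)
    (hqlt : l.getD q ' ' < l.getD p ' ')
    (hub : ∀ k, p < k → k < l.length → l.getD k ' ' < l.getD p ' ' → l.getD k ' ' ≤ l.getD q ' ')
    (hfirst : ∀ k, p < k → k < q → l.getD k ' ' < l.getD p ' ' → l.getD k ' ' < l.getD q ' ')
    (hsuf : ∀ k, p < k → k + 1 < l.length → l.getD k ' ' ≤ l.getD (k + 1) ' ')
    (i j : Nat) (hij : i < j) (hj : j < l.length) (hc : pvSwap l i j < l) :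
    pvSwap l i j ≤ pvSwap l p q := by
  have hji := cand_char l i j hij hj hc
  rcases lt_trichotomy i p with hip | rfl | hip
  · -- swap strictly before the pivot: smaller than A's swap already at position i
    apply le_of_lt
    apply lex_of_getD i _ _ (by rw [length_pvSwap]; omega) (by rw [length_pvSwap]; omega)
    · intro m hm
      rw [getD_pvSwap_other l i j m (by omega) (by omega),
        getD_pvSwap_other l p q m (by omega) (by omega)]
    · rw [getD_pvSwap_i l i j hij hj, getD_pvSwap_other l p q i (by omega) (by omega)]
      exact lt_of_lt_of_le hji (le_refl _)
  · -- swap at the pivot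
    have hjq : l.getD j ' ' ≤ l.getD q ' ' := hub j (by omega) hj hji
    rcases lt_or_eq_of_le hjq with hlt' | heq
    · apply le_of_lt
      apply lex_of_getD i _ _ (by rw [length_pvSwap]; omega) (by rw [length_pvSwap]; omega)
      · intro m hm
        rw [getD_pvSwap_other l i j m (by omega) (by omega),
          getD_pvSwap_other l i q m (by omega) (by omega)]
      · rw [getD_pvSwap_i l i j hij hj, getD_pvSwap_i l i q hpq hqn]
        exact hlt'
    · rcases eq_or_ne j q with rfl | hjq'
      · exact le_refl _
      · have hqj : q < j := by
          rcases lt_or_gt_of_ne hjq' with h' | h'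
          · exact absurd (hfirst j (by omega) h' hji) (by rw [heq]; exact lt_irrefl _)
          · exact h'
        apply le_of_lt
        apply lex_of_getD q _ _ (by rw [length_pvSwap]; omega) (by rw [length_pvSwap]; omega)
        · intro m hm
          rcases eq_or_ne m i with rfl | hmi
          · rw [getD_pvSwap_i l m j hij hj, getD_pvSwap_i l m q hpq hqn, heq]
          · rw [getD_pvSwap_other l i j m (Ne.symm (Ne.symm hmi)) (by omega),
              getD_pvSwap_other l i q m hmi (by omega)]
        · rw [getD_pvSwap_other l i j q (by omega) (by omega), getD_pvSwap_j l i q hpq hqn]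
          calc l.getD q ' ' = l.getD j ' ' := heq.symm
            _ < l.getD i ' ' := hji
  · -- swap inside the nondecreasing suffix: impossible
    exfalso
    have : l.getD i ' ' ≤ l.getD j ' ' :=
      getD_mono l (p + 1) (fun k hk h2 => hsuf k (by omega) h2) i j (by omega) (by omega) hj
    exact absurd this (not_le.mpr hji)

-- loop characterisation of A's while loop
lemma pvPivotLoop_spec (l : List Char) : ∀ (fuel : Nat) (i : Int), (i + 1).toNat ≤ fuel →
    -1 ≤ i → i ≤ (l.length : Int) - 2 →
    (∀ k : Nat, i < (k : Int) → k + 1 < l.length → l.getD k ' ' ≤ l.getD (k + 1) ' ') →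
    (pvPivotLoop l i = -1 ∧ ∀ k : Nat, k + 1 < l.length → l.getD k ' ' ≤ l.getD (k + 1) ' ') ∨
    (∃ p : Nat, pvPivotLoop l i = (p : Int) ∧ p + 2 ≤ l.length ∧
      l.getD (p + 1) ' ' < l.getD p ' ' ∧
      ∀ k : Nat, p < k → k + 1 < l.length → l.getD k ' ' ≤ l.getD (k + 1) ' ') := by
  intro fuel
  induction fuel with
  | zero =>
    intro i hf hlo hhi hsuf
    have hi : i = -1 := by omega
    subst hi
    rw [pvPivotLoop, dif_neg (by intro h; exact absurd h.1 (by norm_num))]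
    exact Or.inl ⟨rfl, fun k hk1 => hsuf k (by omega) hk1⟩
  | succ fuel ih =>
    intro i hf hlo hhi hsuf
    by_cases h : 0 ≤ i ∧ PySem.List.pyGetD l i ' ' ≤ PySem.List.pyGetD l (i + 1) ' '
    · rw [pvPivotLoop, dif_pos h]
      obtain ⟨h0, hle⟩ := h
      obtain ⟨iN, rfl⟩ : ∃ iN : Nat, i = (iN : Int) := ⟨i.toNat, by omega⟩
      apply ih _ (by omega) (by omega) (by omega)
      intro k hk hk1
      by_cases hik : (iN : Int) < (k : Int)
      · exact hsuf k hik hk1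
      · have hki : k = iN := by omega
        subst hki
        rw [PySem.List.pyGetD_natCast] at hle
        rw [show ((k : Int) + 1) = ((k + 1 : Nat) : Int) by push_cast; ring,
          PySem.List.pyGetD_natCast] at hle
        exact hle
    · rw [pvPivotLoop, dif_neg h]
      rcases eq_or_ne i (-1) with rfl | hne
      · exact Or.inl ⟨rfl, fun k hk1 => hsuf k (by omega) hk1⟩
      · have h0 : 0 ≤ i := by omega
        obtain ⟨iN, rfl⟩ : ∃ iN : Nat, i = (iN : Int) := ⟨i.toNat, by omega⟩
        right
        refine ⟨iN, rfl, by omega, ?_, fun k hk hk1 => hsuf k (by omega) hk1⟩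
        have hnle : ¬ PySem.List.pyGetD l (iN : Int) ' ' ≤ PySem.List.pyGetD l ((iN : Int) + 1) ' ' := by
          intro hle; exact h ⟨h0, hle⟩
        rw [PySem.List.pyGetD_natCast,
          show ((iN : Int) + 1) = ((iN + 1 : Nat) : Int) by push_cast; ring,
          PySem.List.pyGetD_natCast] at hnle
        exact not_le.mp hnle

-- generic invariant rule for a foldl over range(a, b)
lemma foldl_pyRange_inv {α : Type} (f : α → Int → α) (P : Int → α → Prop) :
    ∀ (a b : Int), a ≤ b → ∀ (init : α), P a init →
      (∀ j x, a ≤ j → j < b → P j x → P (j + 1) (f x j)) →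
      P b ((PySem.List.pyRange a b 1).foldl f init) := by
  intro a b
  generalize hd : (b - a).toNat = d
  induction d generalizing a with
  | zero =>
    intro hab init h0 _
    have : b = a := by omega
    subst this
    rw [PySem.List.pyRange_one_eq_nil (le_refl _)]
    exact h0
  | succ d ih =>
    intro hab init h0 hstep
    have hlt : a < b := by omega
    rw [PySem.List.pyRange_one_cons hlt]
    simp only [List.foldl_cons]
    exact ih (a + 1) (by omega) (by omega) (f init a) (hstep a init (le_refl _) hlt h0)
      (fun j x h1 h2 => hstep j x (by omega) h2)

-- characterisation of A's max_j loop
lemma maxj_spec (l : List Char) (p : Nat) (hp2 : p + 2 ≤ l.length)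
    (hlt : l.getD (p + 1) ' ' < l.getD p ' ')
    (hsuf : ∀ k : Nat, p < k → k + 1 < l.length → l.getD k ' ' ≤ l.getD (k + 1) ' ') :
    ∃ q : Nat,
      ((PySem.List.pyRange ((p : Int) + 1) ((l.length : Nat) : Int) 1).foldl
        (fun max_j j =>
          if PySem.List.pyGetD l j ' ' < PySem.List.pyGetD l (p : Int) ' ' ∧
             PySem.List.pyGetD l max_j ' ' < PySem.List.pyGetD l j ' ' then j else max_j)
        ((p : Int) + 1)) = (q : Int) ∧
      p < q ∧ q < l.length ∧ l.getD q ' ' < l.getD p ' ' ∧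
      (∀ k : Nat, p < k → k < l.length → l.getD k ' ' < l.getD p ' ' →
        l.getD k ' ' ≤ l.getD q ' ') ∧
      (∀ k : Nat, p < k → k < q → l.getD k ' ' < l.getD p ' ' →
        l.getD k ' ' < l.getD q ' ') := by
  have main := foldl_pyRange_inv
    (f := fun max_j j =>
      if PySem.List.pyGetD l j ' ' < PySem.List.pyGetD l (p : Int) ' ' ∧
         PySem.List.pyGetD l max_j ' ' < PySem.List.pyGetD l j ' ' then j else max_j)
    (P := fun j mj => ∃ m : Nat, mj = (m : Int) ∧ p < m ∧ m < l.length ∧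
      l.getD m ' ' < l.getD p ' ' ∧
      (∀ k : Nat, p < k → (k : Int) < j → l.getD k ' ' < l.getD p ' ' →
        l.getD k ' ' ≤ l.getD m ' ') ∧
      (∀ k : Nat, p < k → k < m → l.getD k ' ' < l.getD p ' ' →
        l.getD k ' ' < l.getD m ' '))
    ((p : Int) + 1) ((l.length : Nat) : Int) (by omega) ((p : Int) + 1)
    ⟨p + 1, by push_cast; ring, by omega, by omega, hlt,
      fun k hk1 hk2 _ => absurd hk2 (by omega), fun k hk1 hk2 _ => absurd hk2 (by omega)⟩
    ?_
  · obtain ⟨m, hm_eq, hm1, hm2, hm3, hm4, hm5⟩ := main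
    exact ⟨m, hm_eq, hm1, hm2, hm3,
      fun k hk1 hk2 hk3 => hm4 k hk1 (by omega) hk3, hm5⟩
  · rintro j x hj1 hj2 ⟨m, rfl, hm1, hm2, hm3, hm4, hm5⟩
    obtain ⟨jN, rfl⟩ : ∃ jN : Nat, j = (jN : Int) := ⟨j.toNat, by omega⟩
    simp only [PySem.List.pyGetD_natCast]
    split_ifs with hc
    · refine ⟨jN, rfl, by omega, by omega, hc.1, ?_, ?_⟩
      · intro k hk1 hk2 hk3
        rcases eq_or_ne k jN with rfl | hne
        · exact le_refl _
        · exact le_of_lt (lt_of_le_of_lt (hm4 k hk1 (by omega) hk3) hc.2)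
      · intro k hk1 hk2 hk3
        exact lt_of_le_of_lt (hm4 k hk1 (by omega) hk3) hc.2
    · refine ⟨m, rfl, hm1, hm2, hm3, ?_, hm5⟩
      intro k hk1 hk2 hk3
      rcases eq_or_ne k jN with rfl | hne
      · exact not_lt.mp (fun hlt' => hc ⟨hk3, hlt'⟩)
      · exact hm4 k hk1 (by omega) hk3

-- B's nested fold is the running max over pvCandList
lemma alt_eq (s : String) :
    find_max_smaller_number_alt s =
      match (pvCandList s.toList).foldl (pvStep s.toList) none with
      | none => "-1"
      | some b => if PySem.List.pyGetD b 0 ' ' = '0' then "-1" else String.ofList b := by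
  unfold find_max_smaller_number_alt pvCandList pvStep
  rw [List.foldl_flatMap]
  simp only [List.foldl_map]

lemma mem_pvCandList (l : List Char) (t : List Char) :
    t ∈ pvCandList l ↔ ∃ i j : Nat, i < j ∧ j < l.length ∧ t = pvSwap l i j := by
  unfold pvCandList
  simp only [List.mem_flatMap, List.mem_map, PySem.List.mem_pyRange_one]
  constructor
  · rintro ⟨i, ⟨hi0, hin⟩, j, ⟨⟨hj1, hjn⟩, rfl⟩⟩
    obtain ⟨iN, rfl⟩ : ∃ iN : Nat, i = (iN : Int) := ⟨i.toNat, by omega⟩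
    obtain ⟨jN, rfl⟩ : ∃ jN : Nat, j = (jN : Int) := ⟨j.toNat, by omega⟩
    refine ⟨iN, jN, by omega, by omega, ?_⟩
    rw [PySem.List.pySetD_of_nonneg _ _ (by omega), PySem.List.pySetD_of_nonneg _ _ (by omega),
      PySem.List.pyGetD_natCast, PySem.List.pyGetD_natCast]
    simp [pvSwap]
  · rintro ⟨i, j, hij, hj, rfl⟩
    refine ⟨(i : Int), ⟨by omega, by omega⟩, (j : Int), ⟨⟨by omega, by omega⟩, ?_⟩⟩
    rw [PySem.List.pySetD_of_nonneg _ _ (by omega), PySem.List.pySetD_of_nonneg _ _ (by omega),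
      PySem.List.pyGetD_natCast, PySem.List.pyGetD_natCast]
    simp [pvSwap]

lemma fold_keep (l : List Char) : ∀ (L : List (List Char)) (b : Option (List Char)),
    (∀ t ∈ L, ¬ t < l) → L.foldl (pvStep l) b = b := by
  intro L
  induction L with
  | nil => intro b _; rfl
  | cons t L ih =>
    intro b h
    have ht : ¬ t < l := h t (by simp)
    have : pvStep l b t = b := by simp [pvStep, ht]
    rw [List.foldl_cons, this]
    exact ih b (fun u hu => h u (by simp [hu]))

lemma fold_none (l : List Char) : ∀ (L : List (List Char)) (b : Option (List Char)),
    L.foldl (pvStep l) b = none → b = none ∧ ∀ t ∈ L, ¬ t < l := by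
  intro L
  induction L with
  | nil => intro b h; exact ⟨h, by simp⟩
  | cons t L ih =>
    intro b h
    rw [List.foldl_cons] at h
    obtain ⟨h1, h2⟩ := ih _ h
    have hb : b = none ∧ ¬ t < l := by
      by_cases htl : t < l
      · exfalso
        cases b with
        | none => simp [pvStep, htl] at h1
        | some w =>
          by_cases hw : w < t <;> simp [pvStep, htl, hw] at h1
      · constructor
        · simpa [pvStep, htl] using h1
        · exact htl
    refine ⟨hb.1, ?_⟩
    intro u hu
    rcases List.mem_cons.mp hu with rfl | hu'
    · exact hb.2
    · exact h2 u hu'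

lemma fold_some_src (l : List Char) : ∀ (L : List (List Char)) (b : Option (List Char))
    (v : List Char), L.foldl (pvStep l) b = some v → b = some v ∨ (v ∈ L ∧ v < l) := by
  intro L
  induction L with
  | nil => intro b v h; exact Or.inl h
  | cons t L ih =>
    intro b v h
    rw [List.foldl_cons] at h
    rcases ih _ _ h with h' | h'
    · by_cases htl : t < l
      · cases b with
        | none =>
          simp [pvStep, htl] at h'
          exact Or.inr ⟨by simp [h'], by rw [← h']; exact htl⟩
        | some w =>
          by_cases hw : w < t
          · simp [pvStep, htl, hw] at h'
            exact Or.inr ⟨by simp [h'], by rw [← h']; exact htl⟩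
          · simp [pvStep, htl, hw] at h'
            exact Or.inl (by rw [h'])
      · rw [show pvStep l b t = b by simp [pvStep, htl]] at h'
        exact Or.inl h'
    · exact Or.inr ⟨by simp [h'.1], h'.2⟩

lemma fold_ub (l : List Char) : ∀ (L : List (List Char)) (b : Option (List Char))
    (v : List Char), L.foldl (pvStep l) b = some v →
    (∀ t ∈ L, t < l → t ≤ v) ∧ (∀ w, b = some w → w ≤ v) := by
  intro L
  induction L with
  | nil =>
    intro b v h
    refine ⟨by simp, fun w hw => ?_⟩
    rw [hw] at h
    exact le_of_eq (Option.some_inj.mp h)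
  | cons t L ih =>
    intro b v h
    rw [List.foldl_cons] at h
    obtain ⟨hA, hB⟩ := ih _ _ h
    have hstep_le : ∀ w, pvStep l b t = some w → w ≤ v := hB
    constructor
    · intro u hu hul
      rcases List.mem_cons.mp hu with rfl | hu'
      · -- u = t
        cases hb : b with
        | none => exact hstep_le u (by simp [pvStep, hul, hb])
        | some w =>
          by_cases hw : w < u
          · exact hstep_le u (by simp [pvStep, hul, hb, hw])
          · have h1 : u ≤ w := not_lt.mp hw
            have h2 : w ≤ v := hstep_le w (by simp [pvStep, hul, hb, hw])
            exact le_trans h1 h2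
      · exact hA u hu' hul
    · intro w hw
      subst hw
      by_cases htl : t < l
      · by_cases hwt : w < t
        · exact le_trans (le_of_lt hwt) (hstep_le t (by simp [pvStep, htl, hwt]))
        · exact hstep_le w (by simp [pvStep, htl, hwt])
      · exact hstep_le w (by simp [pvStep, htl])

-- ===== VERDICT (by name: the statement is the Claim_ definition above) =====
theorem find_max_smaller_number_spec : Claim_equal_find_max_smaller_number := by
  unfold Claim_equal_find_max_smaller_number Spec_find_max_smaller_number
    Pre_find_max_smaller_number
  intro s _ hpre
  have hl : s.toList ≠ [] := by
    intro h
    exact hpre (by simpa using congrArg String.ofList h)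
  have hn : 1 ≤ s.toList.length := List.length_pos_of_ne_nil hl
  rw [alt_eq]
  unfold find_max_smaller_number
  set l := s.toList with hldef
  have hspec := pvPivotLoop_spec l ((l.length : Int) - 1).toNat ((l.length : Int) - 2)
    (by omega) (by omega) (by omega)
    (fun k hk hk1 => absurd hk1 (by omega))
  rcases hspec with ⟨hres, hnd⟩ | ⟨p, hres, hp2, hplt, hsuf⟩
  · -- no pivot: A returns "-1", B finds no strictly smaller swap
    have hkeep : ∀ t ∈ pvCandList l, ¬ t < l := by
      intro t ht
      rw [mem_pvCandList] at ht
      obtain ⟨i, j, hij, hj, rfl⟩ := ht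
      intro hcand
      have hchar := cand_char l i j hij hj hcand
      have hmono := getD_mono l 0 (fun k _ h2 => hnd k h2) i j (Nat.zero_le _)
        (le_of_lt hij) hj
      exact absurd hmono (not_le.mpr hchar)
    simp only [hres, reduceIte]
    rw [fold_keep l _ none hkeep]
  · -- pivot p: A swaps (p, q); B's best candidate is exactly that swap
    simp only [hres]
    rw [if_neg (by omega : ¬ ((p : Nat) : Int) = -1)]
    obtain ⟨q, hq, hpq, hqn, hqlt, hub, hfirst⟩ := maxj_spec l p hp2 hplt hsuf
    rw [hq]
    have hswap_eq : PySem.List.pySetD (PySem.List.pySetD l (p : Int)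
        (PySem.List.pyGetD l (q : Int) ' ')) (q : Int) (PySem.List.pyGetD l (p : Int) ' ')
        = pvSwap l p q := by
      rw [PySem.List.pySetD_of_nonneg _ _ (by omega), PySem.List.pySetD_of_nonneg _ _ (by omega),
        PySem.List.pyGetD_natCast, PySem.List.pyGetD_natCast]
      simp [pvSwap]
    rw [hswap_eq]
    have hrcand : pvSwap l p q < l := swap_lt l p q hpq hqn hqlt
    have hmem : pvSwap l p q ∈ pvCandList l := (mem_pvCandList l _).mpr ⟨p, q, hpq, hqn, rfl⟩
    cases hfold : (pvCandList l).foldl (pvStep l) none with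
    | none =>
      exfalso
      exact (fold_none l _ _ hfold).2 _ hmem hrcand
    | some v =>
      rcases fold_some_src l _ _ _ hfold with h' | h'
      · exact absurd h' (by simp)
      · obtain ⟨i, j, hij, hj, rfl⟩ := (mem_pvCandList l _).mp h'.1
        have h1 : pvSwap l i j ≤ pvSwap l p q :=
          cand_le l p q hpq hqn hqlt hub hfirst hsuf i j hij hj h'.2
        have h2 : pvSwap l p q ≤ pvSwap l i j :=
          (fold_ub l _ _ _ hfold).1 _ hmem hrcand
        rw [le_antisymm h1 h2]
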